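-- pv_equiv track=rewrite | github.com/zorell11/python-academy | 9. Errors & Debugging/Exercises/vertikilni_histogram.py | vert_histogram
-- ===== SOURCE A (Python) =====
-- def vert_histogram(lst, num):
--     table = []
--     number = []
--     for i in range(max(lst), 0, -1):
--         number.append(str(i) + '|')
--     table.append(number)
--     for i in lst:
--         graph = []
--         for j in range(max(lst)):
--             if i>j:
--                 graph.append(num * '*')
--             else:
--                 graph.append(num * ' ')
--         table.append(graph[::-1])
--     return rotate(table)
--
-- def rotate(lst):
--     full_table =[]
--     for i in range(len(lst[0])):
--         line = []
--         for j in range(len(lst)):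
--             line.append(lst[j][i] )
--         full_table.append(line)
--     return full_table
-- ===== SOURCE B (Python) =====
-- def vert_histogram(lst, num):
--     m = max(lst)
--     return [[str(level) + '|'] + [num * ('*' if x >= level else ' ') for x in lst]
--             for level in range(m, 0, -1)]
-- ===== Notes on version B (the rewrite author's own statement) =====
-- stated objective: simpler
-- what changed: B builds the output grid directly row by row (one row per level from max down to 1, testing x >= level), eliminating A's intermediate per-element column table, the per-column [::-1] reversal, the repeated max(lst) evaluation inside the loop, and the rotate/transpose helper.
import Mathlib
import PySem

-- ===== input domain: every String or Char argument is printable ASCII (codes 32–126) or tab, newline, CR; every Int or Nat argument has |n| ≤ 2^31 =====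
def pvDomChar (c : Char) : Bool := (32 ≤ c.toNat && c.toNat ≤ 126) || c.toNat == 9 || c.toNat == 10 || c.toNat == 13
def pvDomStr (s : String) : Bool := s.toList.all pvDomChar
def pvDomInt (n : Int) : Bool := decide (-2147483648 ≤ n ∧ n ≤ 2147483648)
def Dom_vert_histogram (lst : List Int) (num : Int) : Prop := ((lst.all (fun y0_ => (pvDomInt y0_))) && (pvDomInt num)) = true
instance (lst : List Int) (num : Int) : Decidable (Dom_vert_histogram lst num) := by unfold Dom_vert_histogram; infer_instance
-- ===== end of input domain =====

-- B builds each output row directly (level from max down to 1, cell = num*'*' iff x >= level),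
-- dropping A's column table, the per-column [::-1] reversal and the rotate/transpose helper.
-- ===== PORT A =====
-- helper 'rotate' of A; lst[j][i] ported with pyGetD (A only indexes in range: all rows of the
-- table have equal length), len(lst[0]) via headD (A's table is never empty).
def pv_rotate (tab : List (List String)) : List (List String) :=
  (PySem.List.pyRange 0 ((tab.headD []).length : Int) 1).foldl (fun full_table i =>
    full_table ++ [(PySem.List.pyRange 0 (tab.length : Int) 1).foldl (fun line j =>
      line ++ [PySem.List.pyGetD (PySem.List.pyGetD tab j []) i ""]) []]) []

-- max(lst) → max? (Pre_ excludes lst = [], where Python raises ValueError);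
-- str(i)+'|' and num*'*' built on List Char (String.ofList) for kernel transparency.
def vert_histogram (lst : List Int) (num : Int) : List (List String) :=
  let number := (PySem.List.pyRange ((PySem.List.max? lst (fun x => x)).getD 0) 0 (-1)).foldl
      (fun acc i => acc ++ [String.ofList (PySem.Int.toChars i ++ ['|'])]) []
  let table := [number]
  let table := lst.foldl (fun table i =>
      let graph := (PySem.List.pyRange 0 ((PySem.List.max? lst (fun x => x)).getD 0) 1).foldl
        (fun g j => g ++ [if i > j then String.ofList (PySem.List.pyRepeat ['*'] num)
                          else String.ofList (PySem.List.pyRepeat [' '] num)]) []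
      table ++ [(PySem.List.slice? graph none none (-1)).getD []]) table
  pv_rotate table

-- ===== PORT B =====
def vert_histogram_alt (lst : List Int) (num : Int) : List (List String) :=
  let m := (PySem.List.max? lst (fun x => x)).getD 0
  (PySem.List.pyRange m 0 (-1)).map (fun level =>
    String.ofList (PySem.Int.toChars level ++ ['|']) ::
      lst.map (fun x => String.ofList (PySem.List.pyRepeat (if x ≥ level then ['*'] else [' ']) num)))

-- ===== PRECONDITION & SPEC =====
-- Pre_ excludes only the empty list, on which Python's max(lst) raises ValueError (in A and in B).
def Pre_vert_histogram (lst : List Int) (num : Int) : Prop := lst ≠ []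
instance (lst : List Int) (num : Int) : Decidable (Pre_vert_histogram lst num) := by unfold Pre_vert_histogram; infer_instance
def pvWitness_vert_histogram : List Int × Int := ([2, 0, 3], 1)
def Spec_vert_histogram (lst : List Int) (num : Int) (out : List (List String)) : Prop := out = vert_histogram_alt lst num
instance (lst : List Int) (num : Int) (out : List (List String)) : Decidable (Spec_vert_histogram lst num out) := by unfold Spec_vert_histogram; infer_instance

-- ===== CLAIM (what is proved, stated in full; the proofs are below) =====
def Claim_equal_vert_histogram : Prop := ∀ (lst : List Int) (num : Int), Dom_vert_histogram lst num → Pre_vert_histogram lst num → Spec_vert_histogram lst num (vert_histogram lst num)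

-- ===== LEMMAS AND PROOFS =====

-- rotate with an in-range outer index list is a column read: composition corollary of
-- PySem.List.map_pyGetD_pyRange_zero' (cited by name).
theorem pv_map_pyGetD_comp {a b : Type} (xs : List a) (d : a) (h : a -> b) :
    (PySem.List.pyRange 0 (xs.length : Int) 1).map (fun j => h (PySem.List.pyGetD xs j d)) = xs.map h := by
  have hc : (PySem.List.pyRange 0 (xs.length : Int) 1).map (fun j => h (PySem.List.pyGetD xs j d))
      = ((PySem.List.pyRange 0 (xs.length : Int) 1).map (fun j => PySem.List.pyGetD xs j d)).map h := by
    rw [List.map_map]; rfl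
  rw [hc, PySem.List.map_pyGetD_pyRange_zero']

theorem vert_histogram_eq (lst : List Int) (num : Int) :
    vert_histogram lst num = vert_histogram_alt lst num := by
  unfold vert_histogram vert_histogram_alt pv_rotate
  simp only [PySem.List.foldl_append_singleton_eq_map, List.nil_append,
    PySem.List.slice?_none_none_neg_one, Option.getD_some, List.singleton_append]
  set m : Int := (PySem.List.max? lst (fun x => x)).getD 0 with hm
  set M : Nat := m.toNat with hM
  -- name the building blocks
  set hdr : Int → String := fun i => String.ofList (PySem.Int.toChars i ++ ['|']) with hhdr
  set cellA : Int → Int → String := fun i j =>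
    if i > j then String.ofList (PySem.List.pyRepeat ['*'] num)
    else String.ofList (PySem.List.pyRepeat [' '] num) with hcellA
  set g : Int → List String := fun x => ((PySem.List.pyRange 0 m 1).map (cellA x)).reverse with hg
  set number : List String := (PySem.List.pyRange m 0 (-1)).map hdr with hnumber
  have hlen : number.length = M := by
    rw [hnumber, List.length_map, PySem.List.length_pyRange_neg_one]; omega
  have hhead : (number :: lst.map g).headD [] = number := rfl
  rw [hhead, hlen]
  -- rotate = column read
  have hrot : (PySem.List.pyRange 0 (M : Int) 1).map (fun i =>
        (PySem.List.pyRange 0 (((number :: lst.map g).length : Int)) 1).map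
          (fun j => PySem.List.pyGetD (PySem.List.pyGetD (number :: lst.map g) j []) i ""))
      = (PySem.List.pyRange 0 (M : Int) 1).map (fun i =>
          (number :: lst.map g).map (fun row => PySem.List.pyGetD row i "")) := by
    apply List.map_congr_left; intro i _
    exact pv_map_pyGetD_comp (number :: lst.map g) [] (fun row => PySem.List.pyGetD row i "")
  rw [hrot]
  -- both sides are maps over List.range M
  rw [PySem.List.pyRange_one 0 (M : Int), PySem.List.pyRange_neg_one m 0]
  have h1 : ((M : Int) - 0).toNat = M := by omega
  have h2 : (m - 0).toNat = M := by omega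
  rw [h1, h2, List.map_map, List.map_map]
  apply List.map_congr_left
  intro k hk
  have hkM : k < M := List.mem_range.mp hk
  have hmM : (M : Int) = m := by omega
  have hmpos : 0 < m := by omega
  simp only [Function.comp]
  have hz : (0 : Int) + (k : Int) = (k : Int) := by omega
  rw [hz]
  -- unfold one column read
  simp only [List.map_cons, List.map_map]
  congr 1
  · rw [hnumber, PySem.List.pyRange_neg_one m 0, h2, List.map_map, PySem.List.pyGetD_natCast,
      PySem.List.getD_map_range _ M k _ hkM]
    rfl
  · apply List.map_congr_left
    intro x _
    simp only [Function.comp, hg]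
    rw [PySem.List.pyRange_one 0 m, h2, List.map_map]
    have hlen2 : ((List.range M).map ((cellA x) ∘ fun j : Nat => (0:Int) + (j:Int))).reverse.length = M := by
      simp
    rw [PySem.List.pyGetD_natCast, List.getD_eq_getElem _ _ (by rw [hlen2]; exact hkM),
      List.getElem_reverse]
    simp only [List.length_map, List.length_range, List.getElem_map,
      List.getElem_range, Function.comp, hcellA]
    have hcast : (0:Int) + ((M - 1 - k : Nat) : Int) = m - 1 - (k:Int) := by omega
    rw [hcast, apply_ite (fun l => String.ofList (PySem.List.pyRepeat l num)),
      if_congr (by omega : x > m - 1 - (k:Int) ↔ x ≥ m - (k:Int)) rfl rfl]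

-- ===== VERDICT (by name: the statement is the Claim_ definition above) =====
theorem vert_histogram_spec : Claim_equal_vert_histogram := by
  intro lst num _ _
  exact vert_histogram_eq lst num
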